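-- pv_equiv track=rewrite | github.com/Muhkammadjon/hemisbot | modul.py | tayyor
-- ===== SOURCE A (Python) =====
-- def tayyor(file):
--     text=[]
--     i=1
--
--     for bolak in file:
--         if bolak=='':
--             continue
--         if i==1:
--             text.append(bolak)
--         elif i==2:
--             x='1. '+bolak
--             text.append(x)
--         elif 2<i<=5:
--             if i==5:
--                 x='4. '+bolak
--                 text.extend([x,'Ответ: 1'])
--             else:
--                 x=f'{i-1}. '+bolak
--                 text.append(x)
--         i+=1
--         if i>5:
--             i=1
--     return text
-- ===== SOURCE B (Python) =====
-- def tayyor(file):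
--     items = [b for b in file if b != '']
--     text = []
--     for k in range(0, len(items), 5):
--         chunk = items[k:k + 5]
--         for j, it in enumerate(chunk):
--             text.append(it if j == 0 else str(j) + '. ' + it)
--         if len(chunk) == 5:
--             text.append('Ответ: 1')
--     return text
-- ===== Notes on version B (the rewrite author's own statement) =====
-- stated objective: alternative
-- what changed: Replaces A's single pass with a mod-5 position counter by first filtering out empty strings and then formatting the survivors in fixed chunks of five by position, appending the answer line only for full chunks.
import Mathlib
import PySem

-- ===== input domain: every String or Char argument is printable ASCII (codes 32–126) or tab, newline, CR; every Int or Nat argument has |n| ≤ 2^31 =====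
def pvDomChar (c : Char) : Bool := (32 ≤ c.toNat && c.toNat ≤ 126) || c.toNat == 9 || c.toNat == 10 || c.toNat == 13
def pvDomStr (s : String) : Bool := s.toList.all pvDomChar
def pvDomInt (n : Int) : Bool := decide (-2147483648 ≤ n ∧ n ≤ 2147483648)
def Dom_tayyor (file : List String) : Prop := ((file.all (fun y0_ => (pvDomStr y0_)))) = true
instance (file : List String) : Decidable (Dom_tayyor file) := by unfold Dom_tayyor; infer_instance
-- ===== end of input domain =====

-- B reorganises A: filter out empty strings first, then format in fixed chunks of five by
-- position (answer line only for full chunks), instead of A's cyclic mod-5 counter. Alternative decomposition, same cost.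
-- ===== PORT A =====
def tayyorStep (s : List String × Int) (bolak : String) : List String × Int :=
  if bolak = "" then s
  else
    let text := s.1
    let i := s.2
    let text :=
      if i = 1 then text ++ [bolak]
      else if i = 2 then text ++ ["1. " ++ bolak]
      else if 2 < i ∧ i ≤ 5 then
        if i = 5 then text ++ ["4. " ++ bolak, "Ответ: 1"]
        else text ++ [PySem.Int.toStr (i - 1) ++ ". " ++ bolak]
      else text
    let i := i + 1
    (text, if i > 5 then 1 else i)

def tayyor (file : List String) : List String :=
  (file.foldl tayyorStep ([], 1)).1

-- ===== PORT B =====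
-- one chunk: position 0 raw, positions 1..4 labelled, answer line iff the chunk is full
def pvFmtChunk (chunk : List String) : List String :=
  (PySem.List.enumerate chunk).map
    (fun p => if p.1 = 0 then p.2 else PySem.Int.toStr p.1 ++ ". " ++ p.2)
  ++ (if chunk.length = 5 then ["Ответ: 1"] else [])

-- the range(0, len, 5) loop over slices, as recursion on take/drop
def pvChunks5 (items : List String) : List String :=
  match items with
  | [] => []
  | x :: rest => pvFmtChunk (x :: rest.take 4) ++ pvChunks5 (rest.drop 4)
termination_by items.length
decreasing_by simp

def tayyor_alt (file : List String) : List String :=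
  pvChunks5 (file.filter (fun b => b ≠ ""))

-- ===== PRECONDITION & SPEC =====
def Spec_tayyor (file : List String) (out : List String) : Prop := out = tayyor_alt file
instance (file : List String) (out : List String) : Decidable (Spec_tayyor file out) := by unfold Spec_tayyor; infer_instance

-- ===== CLAIM (what is proved, stated in full; the proofs are below) =====
def Claim_equal_tayyor : Prop := ∀ (file : List String), Dom_tayyor file → Spec_tayyor file (tayyor file)

-- ===== LEMMAS AND PROOFS =====


theorem toStr_one : PySem.Int.toStr 1 = "1" := by decide
theorem toStr_four : PySem.Int.toStr 4 = "4" := by decide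
theorem toStr_two : PySem.Int.toStr 2 = "2" := by decide
theorem toStr_three : PySem.Int.toStr 3 = "3" := by decide

theorem pvChunks5_nil : pvChunks5 [] = [] := by rw [pvChunks5]

theorem pvChunks5_cons (x : String) (rest : List String) :
    pvChunks5 (x :: rest) = pvFmtChunk (x :: rest.take 4) ++ pvChunks5 (rest.drop 4) := by
  rw [pvChunks5]

theorem tayyor_filter (file : List String) (s : List String × Int) :
    file.foldl tayyorStep s = (file.filter (fun b => b ≠ "")).foldl tayyorStep s := by
  induction file generalizing s with
  | nil => rfl
  | cons x xs ih =>
    by_cases h : x = ""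
    · subst h; simp [tayyorStep, ih]
    · simp [h, List.foldl_cons, ih]

theorem tayyor_main (items : List String) (h : ∀ x ∈ items, x ≠ "") (text : List String) :
    (items.foldl tayyorStep (text, 1)).1 = text ++ pvChunks5 items := by
  match items with
  | [] => simp [pvChunks5_nil]
  | [a] =>
    simp_all [pvChunks5_cons, pvChunks5_nil, pvFmtChunk, tayyorStep, PySem.List.enumerate]
  | [a, b] =>
    simp_all [pvChunks5_cons, pvChunks5_nil, pvFmtChunk, tayyorStep, PySem.List.enumerate, toStr_one]
  | [a, b, c] =>
    simp_all [pvChunks5_cons, pvChunks5_nil, pvFmtChunk, tayyorStep, PySem.List.enumerate, toStr_one, toStr_two]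
  | [a, b, c, d] =>
    simp_all [pvChunks5_cons, pvChunks5_nil, pvFmtChunk, tayyorStep, PySem.List.enumerate, toStr_one, toStr_two, toStr_three]
  | a :: b :: c :: d :: e :: rest =>
    have hr : ∀ x ∈ rest, x ≠ "" := by intro x hx; exact h x (by simp [hx])
    have h5 : (List.foldl tayyorStep (text, 1) [a, b, c, d, e]) =
        (text ++ [a, "1. " ++ b, "2. " ++ c, "3. " ++ d, "4. " ++ e, "Ответ: 1"], 1) := by
      simp_all [tayyorStep, toStr_two, toStr_three]
    have : List.foldl tayyorStep (text, 1) (a :: b :: c :: d :: e :: rest)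
        = List.foldl tayyorStep (text ++ [a, "1. " ++ b, "2. " ++ c, "3. " ++ d, "4. " ++ e, "Ответ: 1"], 1) rest := by
      rw [show (a :: b :: c :: d :: e :: rest) = [a, b, c, d, e] ++ rest from rfl,
        List.foldl_append, h5]
    rw [this, tayyor_main rest hr]
    simp [pvChunks5_cons, pvFmtChunk, PySem.List.enumerate, toStr_one, toStr_two, toStr_three, toStr_four]

-- ===== VERDICT =====
theorem tayyor_spec : Claim_equal_tayyor := by
  intro file _
  unfold Spec_tayyor tayyor tayyor_alt
  rw [tayyor_filter]
  rw [tayyor_main (file.filter (fun b => b ≠ "")) (by simp) []]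
  simp
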